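-- pv_equiv track=rewrite | github.com/tpavic1/ABI | chapter5/BA5E.py | movesToStrings
-- ===== SOURCE A (Python) =====
-- def movesToStrings(first, second, moves):
--     pointer_w1=0
--     pointer_w2=0
--
--     w1=[]
--     w2=[]
--
--     for move in moves:
--         if move=="down":
--             w1.append(first[pointer_w1])
--             pointer_w1+=1
--             w2.append("-")
--         elif move=="right":
--             w2.append(second[pointer_w2])
--             pointer_w2+=1
--             w1.append("-")
--         elif move=="diag":
--             w1.append(first[pointer_w1])
--             pointer_w1+=1
--             w2.append(second[pointer_w2])
--             pointer_w2+=1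
--
--     return "".join(w1), "".join(w2)
-- ===== SOURCE B (Python) =====
-- def movesToStrings(first, second, moves):
--     def build(word, consume, dash):
--         p = 0
--         out = []
--         for move in moves:
--             if move in consume:
--                 out.append(word[p])
--                 p += 1
--             elif move in dash:
--                 out.append("-")
--         return "".join(out)
--     return (build(first, ("down", "diag"), ("right",)),
--             build(second, ("right", "diag"), ("down",)))
-- ===== Notes on version B (the rewrite author's own statement) =====
-- stated objective: simpler
-- what changed: Replaces the single interleaved pass building both strings at once with a small helper build(word, consume, dash) run twice, each pass building one alignment string independently.
import Mathlib
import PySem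

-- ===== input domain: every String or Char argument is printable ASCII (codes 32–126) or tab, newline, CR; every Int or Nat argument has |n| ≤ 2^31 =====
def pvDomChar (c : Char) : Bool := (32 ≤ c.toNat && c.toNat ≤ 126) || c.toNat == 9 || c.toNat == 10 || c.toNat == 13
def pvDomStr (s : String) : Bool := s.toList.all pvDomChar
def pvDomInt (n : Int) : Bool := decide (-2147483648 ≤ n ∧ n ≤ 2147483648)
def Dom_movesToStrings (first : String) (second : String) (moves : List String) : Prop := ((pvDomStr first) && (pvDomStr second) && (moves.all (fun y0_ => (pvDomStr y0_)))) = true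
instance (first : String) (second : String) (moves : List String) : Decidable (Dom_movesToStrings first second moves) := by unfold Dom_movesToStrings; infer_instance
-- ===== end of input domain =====

-- B builds the two alignment strings by two independent passes (one helper, two calls)
-- instead of A's single interleaved pass; objective: simpler. Same values on all of Pre_.

-- ===== PORT A =====
-- A's for-loop over moves with state (pointer_w1, pointer_w2, w1, w2), as structural recursion.
-- word[pointer] is in range on all of Pre_ (out of range Python raises IndexError; excluded by Pre_),
-- so List.getD with a dummy default is exact there.
def loopA (fl sl : List Char) : List String → Nat → Nat → List Char → List Char → List Char × List Char
  | [], _, _, w1, w2 => (w1, w2)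
  | m :: rest, p1, p2, w1, w2 =>
    if m = "down" then loopA fl sl rest (p1+1) p2 (w1 ++ [fl.getD p1 '?']) (w2 ++ ['-'])
    else if m = "right" then loopA fl sl rest p1 (p2+1) (w1 ++ ['-']) (w2 ++ [sl.getD p2 '?'])
    else if m = "diag" then loopA fl sl rest (p1+1) (p2+1) (w1 ++ [fl.getD p1 '?']) (w2 ++ [sl.getD p2 '?'])
    else loopA fl sl rest p1 p2 w1 w2

def movesToStrings (first : String) (second : String) (moves : List String) : String × String :=
  let r := loopA first.toList second.toList moves 0 0 [] []
  (String.mk r.1, String.mk r.2)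

-- ===== PORT B =====
-- B's helper build(word, consume, dash): own index p over moves, one output list.
def buildB (word : List Char) (consume dash : List String) : List String → Nat → List Char
  | [], _ => []
  | m :: rest, p =>
    if m ∈ consume then word.getD p '?' :: buildB word consume dash rest (p+1)
    else if m ∈ dash then '-' :: buildB word consume dash rest p
    else buildB word consume dash rest p

def movesToStrings_alt (first : String) (second : String) (moves : List String) : String × String :=
  (String.mk (buildB first.toList ["down", "diag"] ["right"] moves 0),
   String.mk (buildB second.toList ["right", "diag"] ["down"] moves 0))

-- ===== PRECONDITION & SPEC =====
-- Pre_: exactly the inputs where Python A returns (no IndexError): the moves consuming each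
-- word fit within its length.
def Pre_movesToStrings (first : String) (second : String) (moves : List String) : Prop :=
  moves.count "down" + moves.count "diag" ≤ first.length ∧
  moves.count "right" + moves.count "diag" ≤ second.length
instance (first : String) (second : String) (moves : List String) : Decidable (Pre_movesToStrings first second moves) := by unfold Pre_movesToStrings; infer_instance

def pvWitness_movesToStrings : String × String × List String := ("AB", "B", ["down", "diag"])

def Spec_movesToStrings (first : String) (second : String) (moves : List String) (out : String × String) : Prop := out = movesToStrings_alt first second moves
instance (first : String) (second : String) (moves : List String) (out : String × String) : Decidable (Spec_movesToStrings first second moves out) := by unfold Spec_movesToStrings; infer_instance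

-- ===== CLAIM (what is proved, stated in full; the proofs are below) =====
def Claim_equal_movesToStrings : Prop := ∀ (first : String) (second : String) (moves : List String), Dom_movesToStrings first second moves → Pre_movesToStrings first second moves → Spec_movesToStrings first second moves (movesToStrings first second moves)

-- ===== LEMMAS AND PROOFS =====
lemma loopA_eq_buildB (fl sl : List Char) (moves : List String) :
    ∀ (p1 p2 : Nat) (w1 w2 : List Char),
      loopA fl sl moves p1 p2 w1 w2 =
        (w1 ++ buildB fl ["down", "diag"] ["right"] moves p1,
         w2 ++ buildB sl ["right", "diag"] ["down"] moves p2) := by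
  induction moves with
  | nil => intro p1 p2 w1 w2; simp [loopA, buildB]
  | cons m rest ih =>
    intro p1 p2 w1 w2
    by_cases hd : m = "down"
    · simp [loopA, buildB, hd, ih]
    · by_cases hr : m = "right"
      · simp [loopA, buildB, hr, ih]
      · by_cases hg : m = "diag"
        · simp [loopA, buildB, hg, ih]
        · simp [loopA, buildB, hd, hr, hg, ih]

-- ===== VERDICT (by name: the statement is the Claim_ definition above) =====
theorem movesToStrings_spec : Claim_equal_movesToStrings := by
  intro first second moves _ _
  unfold Spec_movesToStrings movesToStrings movesToStrings_alt
  simp [loopA_eq_buildB]
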